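-- pv_equiv track=rewrite | github.com/Lautiim/ayed1-2025-tps | TP6/Ejercicio_04/Ejercicio_04.py | contar_delimitadores
-- ===== SOURCE A (Python) =====
-- def contar_delimitadores(linea, delimitador):
--     """Cuenta cuántas veces aparece el delimitador en la línea."""
--     contador = 0
--     pos = 0
--     while pos < len(linea):
--         pos = linea.find(delimitador, pos)
--         if pos == -1:
--             break
--         if not esta_en_cadena_hasta_pos(linea, pos):
--             contador += 1
--         pos += len(delimitador)
--     return contador
--
-- def esta_en_cadena_hasta_pos(linea, pos):
--     """Verifica si una posición está dentro de una cadena delimitada por comillas."""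
--     en_comilla_simple = False
--     en_comilla_doble = False
--
--     for i in range(pos):
--         char = linea[i]
--
--         # Ignorar caracteres escapados
--         if i > 0 and linea[i - 1] == "\\":
--             continue
--
--         if char == '"' and not en_comilla_simple:
--             en_comilla_doble = not en_comilla_doble
--         elif char == "'" and not en_comilla_doble:
--             en_comilla_simple = not en_comilla_simple
--
--     return en_comilla_simple or en_comilla_doble
-- ===== SOURCE B (Python) =====
-- def contar_delimitadores(linea, delimitador):
--     """Cuenta cuántas veces aparece el delimitador en la línea (fuera de comillas),
--     en una sola pasada manteniendo el estado de comillas incrementalmente."""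
--     n = len(linea)
--     m = len(delimitador)
--     contador = 0
--     simple = False
--     doble = False
--     i = 0
--     while i < n:
--         if linea.startswith(delimitador, i):
--             if not (simple or doble):
--                 contador += 1
--             paso = m
--         else:
--             paso = 1
--         for j in range(i, i + paso):
--             if j > 0 and linea[j - 1] == "\\":
--                 continue
--             c = linea[j]
--             if c == '"' and not simple:
--                 doble = not doble
--             elif c == "'" and not doble:
--                 simple = not simple
--         i += paso
--     return contador
-- ===== Notes on version B (the rewrite author's own statement) =====
-- stated objective: faster
-- what changed: A re-scans the whole prefix with esta_en_cadena_hasta_pos at every delimiter occurrence found by repeated str.find; B makes a single left-to-right pass that maintains the quote/escape state incrementally and checks the delimiter at each position.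
import Mathlib
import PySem

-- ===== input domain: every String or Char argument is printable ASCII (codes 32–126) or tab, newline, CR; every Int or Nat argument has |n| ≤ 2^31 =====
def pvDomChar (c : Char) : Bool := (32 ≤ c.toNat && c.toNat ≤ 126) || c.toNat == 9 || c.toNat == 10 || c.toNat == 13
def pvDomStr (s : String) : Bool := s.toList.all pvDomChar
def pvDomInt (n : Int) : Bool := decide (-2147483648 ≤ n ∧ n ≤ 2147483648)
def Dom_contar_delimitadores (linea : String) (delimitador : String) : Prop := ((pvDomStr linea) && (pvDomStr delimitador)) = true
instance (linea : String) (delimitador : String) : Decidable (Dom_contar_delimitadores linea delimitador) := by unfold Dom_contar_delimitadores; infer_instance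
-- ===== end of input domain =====

-- B replaces A's quadratic "find next occurrence, then re-scan the whole prefix for quote state"
-- with one left-to-right pass maintaining the quote/escape state incrementally.

-- ===== PORT A =====
-- step of the for-loop of esta_en_cadena_hasta_pos; st = (en_comilla_simple, en_comilla_doble)
def pvEstaStep (l : List Char) (st : Bool × Bool) (i : Int) : Bool × Bool :=
  -- linea[i] and linea[i-1]: exact, every i visited satisfies 0 ≤ i < pos ≤ len(linea)
  if 0 < i ∧ (PySem.List.pyGet? l (i - 1)).getD ' ' = '\\' then st
  else
    let c := (PySem.List.pyGet? l i).getD ' '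
    if c = '"' ∧ st.1 = false then (st.1, !st.2)
    else if c = '\'' ∧ st.2 = false then (!st.1, st.2)
    else st

def esta_en_cadena_hasta_pos (l : List Char) (pos : Int) : Bool :=
  let st := (PySem.List.pyRange 0 pos 1).foldl (pvEstaStep l) (false, false)
  st.1 || st.2

-- the while-loop of A; fuel is only a totality guard (never exhausted under Pre_,
-- where the Python loop terminates; on delimitador = "" with linea ≠ "" Python diverges)
def pvLoopA (l d : List Char) (fuel : Nat) (pos : Nat) (contador : Int) : Int :=
  match fuel with
  | 0 => contador
  | fuel + 1 =>
    if pos < l.length then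
      let f := PySem.Chars.findFrom l d (pos : Int)   -- linea.find(delimitador, pos)
      if f = -1 then contador
      else
        let j := f.toNat
        let contador := if esta_en_cadena_hasta_pos l (j : Int) = false then contador + 1 else contador
        pvLoopA l d fuel (j + d.length) contador
    else contador

def contar_delimitadores (linea : String) (delimitador : String) : Int :=
  pvLoopA linea.toList delimitador.toList (linea.toList.length + 1) 0 0

-- ===== PORT B =====
-- one step of Source B's inner for-loop; st = (simple, doble)
def pvStepB (l : List Char) (st : Bool × Bool) (j : Nat) : Bool × Bool :=
  -- linea[j] and linea[j-1]: exact, every visited j satisfies j < len(linea)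
  if 0 < j ∧ l.getD (j - 1) ' ' = '\\' then st
  else
    let c := l.getD j ' '
    if c = '"' ∧ st.1 = false then (st.1, !st.2)
    else if c = '\'' ∧ st.2 = false then (!st.1, st.2)
    else st

-- Source B's while-loop; fuel is only a totality guard (never exhausted under Pre_)
def pvLoopB (l d : List Char) (fuel : Nat) (i : Nat) (st : Bool × Bool) (contador : Int) : Int :=
  match fuel with
  | 0 => contador
  | fuel + 1 =>
    if i < l.length then
      if d.isPrefixOf (l.drop i) then     -- linea.startswith(delimitador, i)
        let contador := if ¬ (st.1 || st.2) then contador + 1 else contador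
        pvLoopB l d fuel (i + d.length) ((List.range' i d.length).foldl (pvStepB l) st) contador
      else
        pvLoopB l d fuel (i + 1) ((List.range' i 1).foldl (pvStepB l) st) contador
    else contador

def contar_delimitadores_alt (linea : String) (delimitador : String) : Int :=
  pvLoopB linea.toList delimitador.toList (linea.toList.length + 1) 0 (false, false) 0

-- ===== PRECONDITION & SPEC =====
-- Pre_ excludes only delimitador = "" with linea ≠ "", where Python A (str.find returns pos,
-- pos += 0) loops forever and returns nothing.
def Pre_contar_delimitadores (linea : String) (delimitador : String) : Prop :=
  delimitador ≠ "" ∨ linea = ""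
instance (linea : String) (delimitador : String) : Decidable (Pre_contar_delimitadores linea delimitador) := by unfold Pre_contar_delimitadores; infer_instance

def pvWitness_contar_delimitadores : String × String := ("a,'b,c',\\'d,e", ",")

def Spec_contar_delimitadores (linea : String) (delimitador : String) (out : Int) : Prop := out = contar_delimitadores_alt linea delimitador
instance (linea : String) (delimitador : String) (out : Int) : Decidable (Spec_contar_delimitadores linea delimitador out) := by unfold Spec_contar_delimitadores; infer_instance

-- ===== CLAIM (what is proved, stated in full; the proofs are below) =====
def Claim_equal_contar_delimitadores : Prop := ∀ (linea : String) (delimitador : String), Dom_contar_delimitadores linea delimitador → Pre_contar_delimitadores linea delimitador → Spec_contar_delimitadores linea delimitador (contar_delimitadores linea delimitador)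

-- ===== LEMMAS AND PROOFS =====

-- quote state after scanning the first k characters (what B maintains incrementally)
def pvStA (l : List Char) (k : Nat) : Bool × Bool := (List.range k).foldl (pvStepB l) (false, false)

theorem pvStep_eq (l : List Char) (st : Bool × Bool) (j : Nat) :
    pvEstaStep l st (j : Int) = pvStepB l st j := by
  cases j with
  | zero =>
      have h0 : PySem.List.pyGet? l 0 = l[0]? := by simpa using PySem.List.pyGet?_natCast l 0
      simp [pvEstaStep, pvStepB, h0, List.getD_eq_getElem?_getD]
  | succ j =>
      have h2 : PySem.List.pyGet? l ((j : Int) + 1) = l[j + 1]? := by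
        simpa using PySem.List.pyGet?_natCast l (j + 1)
      simp [pvEstaStep, pvStepB, h2, List.getD_eq_getElem?_getD]

theorem pvEsta_eq (l : List Char) (k : Nat) :
    esta_en_cadena_hasta_pos l (k : Int) = ((pvStA l k).1 || (pvStA l k).2) := by
  have hr : PySem.List.pyRange 0 (k : Int) 1 = (List.range k).map (fun n : Nat => ((n : Int))) := by
    rw [PySem.List.pyRange_one]
    simp
  have : (PySem.List.pyRange 0 (k : Int) 1).foldl (pvEstaStep l) (false, false)
      = (List.range k).foldl (pvStepB l) (false, false) := by
    have hfun : (fun (st : Bool × Bool) (x : Nat) => pvEstaStep l st ((fun n : Nat => ((n : Int))) x)) = pvStepB l := by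
      funext st x; exact pvStep_eq l st x
    rw [hr, List.foldl_map, hfun]
  simp [esta_en_cadena_hasta_pos, this, pvStA]

theorem pvStA_succ (l : List Char) (k : Nat) :
    pvStA l (k + 1) = pvStepB l (pvStA l k) k := by
  simp [pvStA, List.range_succ]

theorem pvStA_block (l : List Char) (m : Nat) : ∀ k : Nat,
    (List.range' k m).foldl (pvStepB l) (pvStA l k) = pvStA l (k + m) := by
  induction m with
  | zero => intro k; simp
  | succ m ih =>
      intro k
      rw [List.range'_succ, List.foldl_cons, ← pvStA_succ, ih (k + 1)]
      ring_nf

theorem pvLoopB_end (l d : List Char) (fuel i : Nat) (st : Bool × Bool) (cnt : Int)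
    (h : l.length ≤ i) : pvLoopB l d fuel i st cnt = cnt := by
  cases fuel with
  | zero => rfl
  | succ fuel => simp [pvLoopB, Nat.not_lt.mpr h]

-- B walks over a match-free stretch without counting, updating only the state
theorem pvLoopB_walk (l d : List Char) : ∀ (k fb i : Nat) (st : Bool × Bool) (cnt : Int),
    (∀ m, i ≤ m → m < i + k → ¬ d <+: l.drop m) → i + k ≤ l.length →
    pvLoopB l d (k + fb) i st cnt = pvLoopB l d fb (i + k) ((List.range' i k).foldl (pvStepB l) st) cnt := by
  intro k
  induction k with
  | zero => intro fb i st cnt _ _; simp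
  | succ k ih =>
      intro fb i st cnt hnm hlen
      have hi : i < l.length := by omega
      have hno : ¬ d.isPrefixOf (l.drop i) = true := by
        rw [List.isPrefixOf_iff_prefix]
        exact hnm i le_rfl (by omega)
      have hstep : (k + 1) + fb = (k + fb) + 1 := by omega
      rw [hstep]
      show pvLoopB l d ((k + fb) + 1) i st cnt = _
      rw [pvLoopB]
      simp only [hi, if_true]
      have hih := ih fb (i + 1) ((List.range' i 1).foldl (pvStepB l) st) cnt
        (fun m h1 h2 => hnm m (by omega) (by omega)) (by omega)
      have harg : i + (k + 1) = (i + 1) + k := by omega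
      have hst : List.foldl (pvStepB l) st (List.range' i (k + 1))
          = List.foldl (pvStepB l) (pvStepB l st i) (List.range' (i + 1) k) := by
        rw [List.range'_succ (n := k)]
        simp
      rw [if_neg hno, hih, harg, hst]
      simp [List.range'_one]

-- main induction: from any position p, A's find-and-rescan loop and B's single pass agree
theorem pvLoop_eq (l d : List Char) (hd : d ≠ []) : ∀ (N : Nat), ∀ (p : Nat) (cnt : Int) (fa fb : Nat),
    p ≤ l.length → l.length - p < fa → l.length - p < fb → l.length - p ≤ N →
    pvLoopA l d fa p cnt = pvLoopB l d fb p (pvStA l p) cnt := by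
  intro N
  induction N with
  | zero =>
      intro p cnt fa fb hp hfa hfb hN
      have hpe : p = l.length := by omega
      obtain ⟨fa', rfl⟩ : ∃ fa', fa = fa' + 1 := ⟨fa - 1, by omega⟩
      rw [pvLoopA, pvLoopB_end l d fb p _ cnt (by omega)]
      simp [Nat.not_lt.mpr (le_of_eq hpe.symm)]
  | succ N ih =>
      intro p cnt fa fb hp hfa hfb hN
      obtain ⟨fa', rfl⟩ : ∃ fa', fa = fa' + 1 := ⟨fa - 1, by omega⟩
      by_cases hlt : p < l.length
      · rw [pvLoopA]
        simp only [hlt, if_true]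
        by_cases hf : PySem.Chars.findFrom l d (p : Int) = -1
        · -- no further occurrence: A breaks; B walks to the end without counting
          simp only [hf, if_true]
          have hninf : ¬ d <:+: l.drop p :=
            (PySem.Chars.findFrom_natCast_eq_neg_one_iff l d p hp).mp hf
          have hnm : ∀ m, p ≤ m → m < p + (l.length - p) → ¬ d <+: l.drop m := by
            intro m h1 _ hpre
            apply hninf
            rw [← PySem.Chars.isIn_iff_infix]
            rw [← PySem.Chars.exists_prefix_drop_iff_isIn]
            refine ⟨m - p, ?_⟩
            rw [List.drop_drop, show p + (m - p) = m by omega]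
            exact hpre
          obtain ⟨fb', rfl⟩ : ∃ fb', fb = (l.length - p) + fb' := ⟨fb - (l.length - p), by omega⟩
          rw [pvLoopB_walk l d (l.length - p) fb' p _ cnt hnm (by omega)]
          rw [pvLoopB_end l d fb' _ _ cnt (by omega)]
        · -- next occurrence at j: B walks to j, counts there iff outside quotes, both continue at j+|d|
          simp only [hf, if_false]
          obtain ⟨hple, hpre, hmin⟩ := PySem.Chars.findFrom_natCast_spec l d p hp hf
          set f := PySem.Chars.findFrom l d (p : Int) with hfdef
          have hpj : p ≤ f.toNat := by omega
          have hjlt : f.toNat < l.length := by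
            by_contra h
            have : l.drop f.toNat = [] := List.drop_eq_nil_of_le (by omega)
            rw [this] at hpre
            exact hd (List.prefix_nil.mp hpre)
          have hdlen : d.length ≤ l.length - f.toNat := by
            have := hpre.length_le
            simp [List.length_drop] at this
            omega
          have hdpos : 0 < d.length := List.length_pos_iff.mpr hd
          obtain ⟨fb', rfl⟩ : ∃ fb', fb = (f.toNat - p) + fb' := ⟨fb - (f.toNat - p), by omega⟩
          rw [pvLoopB_walk l d (f.toNat - p) fb' p _ cnt
            (fun m h1 h2 => hmin m h1 (by omega)) (by omega)]
          rw [pvStA_block]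
          have hppj : p + (f.toNat - p) = f.toNat := by omega
          rw [hppj]
          obtain ⟨fb'', rfl⟩ : ∃ fb'', fb' = fb'' + 1 := ⟨fb' - 1, by omega⟩
          rw [pvLoopB]
          simp only [hjlt, if_true]
          rw [if_pos (List.isPrefixOf_iff_prefix.mpr hpre)]
          rw [pvStA_block]
          have hcnt : (if esta_en_cadena_hasta_pos l (f.toNat : Int) = false then cnt + 1 else cnt)
              = (if ¬ ((pvStA l f.toNat).1 || (pvStA l f.toNat).2) then cnt + 1 else cnt) := by
            rw [pvEsta_eq]
            simp [Bool.not_eq_true]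
          rw [hcnt]
          exact ih (f.toNat + d.length) _ fa' fb'' (by omega) (by omega) (by omega) (by omega)
      · rw [pvLoopB_end l d fb p _ cnt (by omega), pvLoopA]
        simp [hlt]

theorem pvToList_ne_nil {s : String} (h : s ≠ "") : s.toList ≠ [] := by
  intro hn
  exact h (String.toList_inj.mp (by simpa using hn))

-- ===== VERDICT (by name: the statement is the Claim_ definition above) =====
theorem contar_delimitadores_spec : Claim_equal_contar_delimitadores := by
  intro linea delimitador _ hpre
  unfold Spec_contar_delimitadores contar_delimitadores contar_delimitadores_alt
  rcases hpre with hd | hl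
  · have hd' : delimitador.toList ≠ [] := pvToList_ne_nil hd
    have h0 : pvStA linea.toList 0 = (false, false) := rfl
    rw [← h0]
    exact pvLoop_eq linea.toList delimitador.toList hd' linea.toList.length 0 0 _ _
      (Nat.zero_le _) (by omega) (by omega) (by omega)
  · subst hl
    rfl
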